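-- pv_equiv track=rewrite | github.com/alumnos-ingcom/python-1-Julian03-lab | ejercicios/ejercicio4.py | suma_lenta
-- ===== SOURCE A (Python) =====
-- def suma_lenta(numero, otro_numero):
--     """
--     Recibe dos numeros enteros positivos o negativos y hace la suma entre ellos de forma lenta. Retorna la suma entre los dos numeros.
--     """
--     count = 0
--     if otro_numero < 0:
--         while otro_numero < count:
--             numero -= 1
--             count -= 1
--     elif otro_numero > 0:
--         while otro_numero > count:
--             numero += 1
--             count += 1
--     return(numero)
-- ===== SOURCE B (Python) =====
-- def suma_lenta(numero, otro_numero):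
--     """
--     Recibe dos numeros enteros positivos o negativos y hace la suma entre ellos de forma lenta. Retorna la suma entre los dos numeros.
--     """
--     return numero + otro_numero
-- ===== Notes on version B (the rewrite author's own statement) =====
-- stated objective: faster
-- what changed: replaces the unit-step increment/decrement loop by direct integer addition numero + otro_numero
import Mathlib
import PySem

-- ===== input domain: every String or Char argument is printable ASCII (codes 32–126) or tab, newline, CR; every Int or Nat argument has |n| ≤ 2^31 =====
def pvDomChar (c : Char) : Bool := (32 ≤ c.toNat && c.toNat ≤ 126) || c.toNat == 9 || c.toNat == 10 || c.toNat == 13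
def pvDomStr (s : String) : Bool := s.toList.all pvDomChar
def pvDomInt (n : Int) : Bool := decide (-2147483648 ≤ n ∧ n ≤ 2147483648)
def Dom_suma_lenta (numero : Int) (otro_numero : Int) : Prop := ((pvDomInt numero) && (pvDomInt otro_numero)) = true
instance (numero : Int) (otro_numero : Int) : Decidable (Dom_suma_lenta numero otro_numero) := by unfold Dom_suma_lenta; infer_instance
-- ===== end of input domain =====

-- B replaces A's unit-step increment/decrement loop by direct addition (O(1) vs O(|otro_numero|)).

-- ===== PORT A =====
-- the 'while otro_numero < count: numero -= 1; count -= 1' loop of A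
def sumaNegLoop (numero : Int) (count : Int) (otro_numero : Int) : Int :=
  if otro_numero < count then sumaNegLoop (numero - 1) (count - 1) otro_numero
  else numero
termination_by (count - otro_numero).toNat
decreasing_by omega

-- the 'while otro_numero > count: numero += 1; count += 1' loop of A
def sumaPosLoop (numero : Int) (count : Int) (otro_numero : Int) : Int :=
  if otro_numero > count then sumaPosLoop (numero + 1) (count + 1) otro_numero
  else numero
termination_by (otro_numero - count).toNat
decreasing_by omega

def suma_lenta (numero : Int) (otro_numero : Int) : Int :=
  if otro_numero < 0 then sumaNegLoop numero 0 otro_numero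
  else if otro_numero > 0 then sumaPosLoop numero 0 otro_numero
  else numero

-- ===== PORT B =====
def suma_lenta_alt (numero : Int) (otro_numero : Int) : Int :=
  numero + otro_numero

-- ===== PRECONDITION & SPEC =====
def Spec_suma_lenta (numero : Int) (otro_numero : Int) (out : Int) : Prop := out = suma_lenta_alt numero otro_numero
instance (numero : Int) (otro_numero : Int) (out : Int) : Decidable (Spec_suma_lenta numero otro_numero out) := by unfold Spec_suma_lenta; infer_instance

-- ===== CLAIM (what is proved, stated in full; the proofs are below) =====
def Claim_equal_suma_lenta : Prop := ∀ (numero : Int) (otro_numero : Int), Dom_suma_lenta numero otro_numero → Spec_suma_lenta numero otro_numero (suma_lenta numero otro_numero)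

-- ===== LEMMAS AND PROOFS =====
theorem sumaNegLoop_eq (numero count otro_numero : Int) (h : otro_numero ≤ count) :
    sumaNegLoop numero count otro_numero = numero + (otro_numero - count) := by
  fun_induction sumaNegLoop numero count otro_numero with
  | case1 => rename_i hlt ih; rw [ih (by omega)]; ring
  | case2 => omega

theorem sumaPosLoop_eq (numero count otro_numero : Int) (h : count ≤ otro_numero) :
    sumaPosLoop numero count otro_numero = numero + (otro_numero - count) := by
  fun_induction sumaPosLoop numero count otro_numero with
  | case1 => rename_i hlt ih; rw [ih (by omega)]; ring
  | case2 => omega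

-- ===== VERDICT (by name: the statement is the Claim_ definition above) =====
theorem suma_lenta_spec : Claim_equal_suma_lenta := by
  intro numero otro_numero _
  unfold Spec_suma_lenta suma_lenta suma_lenta_alt
  split_ifs with h1 h2
  · rw [sumaNegLoop_eq _ _ _ (by omega)]; ring
  · rw [sumaPosLoop_eq _ _ _ (by omega)]; ring
  · omega
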